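-- pv_equiv track=rewrite | github.com/magedu-pythons/python-14 | caixiaoqiang/week11/3.words_dict.py | WordsDict
-- ===== SOURCE A (Python) =====
-- def WordsDict(strs):
--     dict = {'is': 'is', 'this': 'this', 'example': 'example', 'an': 'an', 'any': 'any', 'and': 'and'}
--     lens = len(strs)
--     words = ""
--     start = 0
--     while start < lens:
--         val = ""
--         rec = start
--         for end in range(start + 1, lens + 1):
--             for value in dict.values():
--                 if strs[start:end] == value:
--                     if val < value:
--                         val = value
--                         rec = end
--         if rec != start:
--             start = rec - 1
--         if val != "":
--             if words == "":
--                  words += val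
--             else:
--                 words += " " + val
--
--         start += 1
--     return words
-- ===== SOURCE B (Python) =====
-- def WordsDict(strs):
--     words = ('is', 'this', 'example', 'an', 'any', 'and')
--     def go(start):
--         if start >= len(strs):
--             return []
--         matches = [w for w in words if strs.startswith(w, start)]
--         if matches:
--             best = max(matches)
--             return [best] + go(start + len(best))
--         return go(start + 1)
--     return " ".join(go(0))
-- ===== Notes on version B (the rewrite author's own statement) =====
-- stated objective: faster
-- what changed: A runs an imperative while loop over start with a nested end-position x dict-values slice-comparison scan and a rec/advance trick, building the result string with conditional separators; B is a recursive function that at each position filters the dictionary words by strs.startswith, takes max() of the matches, jumps directly by the chosen word's length, and space-joins the collected word list at the end.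
import Mathlib
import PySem

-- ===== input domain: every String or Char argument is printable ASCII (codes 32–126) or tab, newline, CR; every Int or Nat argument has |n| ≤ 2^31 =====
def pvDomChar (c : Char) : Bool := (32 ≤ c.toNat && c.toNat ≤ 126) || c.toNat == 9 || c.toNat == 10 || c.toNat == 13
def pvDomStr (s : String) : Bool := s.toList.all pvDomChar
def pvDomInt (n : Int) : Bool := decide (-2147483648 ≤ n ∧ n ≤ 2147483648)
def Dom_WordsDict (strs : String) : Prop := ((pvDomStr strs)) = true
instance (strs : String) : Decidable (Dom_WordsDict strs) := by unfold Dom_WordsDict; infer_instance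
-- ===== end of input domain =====

-- B replaces A's imperative while loop with nested end-position × dict-values slice scans and
-- string accumulation by a recursion that filters the words by startswith, takes their max and
-- joins the collected word list with " " at the end; a timing run measured B faster.

-- ===== PORT A =====
-- the hardcoded dict of A (keys = values, insertion order)
def pvDict : List (String × String) :=
  [("is", "is"), ("this", "this"), ("example", "example"), ("an", "an"), ("any", "any"), ("and", "and")]

-- inner double loop of A at a given start: for end in range(start+1, lens+1): for value in dict.values(): …
def pvInnerA (cs : List Char) (lens start : Int) : String × Int :=
  (PySem.List.pyRange (start + 1) (lens + 1) 1).foldl (fun vr e =>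
    (pvDict.map (·.2)).foldl (fun vr value =>
      if PySem.List.slice cs (some start) (some e) = value.toList ∧ vr.1 < value
      then (value, e) else vr) vr) ("", start)

-- the while loop of A (fuel = number of remaining iterations; start rises by ≥ 1 per iteration)
def pvLoopA (cs : List Char) (lens : Int) : Nat → Int → String → String
  | 0, _, words => words
  | fuel + 1, start, words =>
    if start < lens then
      let vr := pvInnerA cs lens start
      let start' := if vr.2 ≠ start then vr.2 - 1 else start
      let words' := if vr.1 ≠ "" then (if words = "" then words ++ vr.1 else words ++ " " ++ vr.1) else words
      pvLoopA cs lens fuel (start' + 1) words'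
    else words

def WordsDict (strs : String) : String :=
  pvLoopA strs.toList (strs.toList.length : Int) (strs.toList.length + 1) 0 ""

-- ===== PORT B =====
-- the words tuple of B (same six words)
def pvWordsB : List String := ["is", "this", "example", "an", "any", "and"]

-- B's recursion go(start): filter by startswith, take max of the matches, jump by its length
-- (fuel = enough recursion depth; start rises by ≥ 1 per call)
def pvGoB (cs : List Char) : Nat → Int → List String
  | 0, _ => []
  | fuel + 1, start =>
    if start ≥ (cs.length : Int) then []
    else
      let ms := pvWordsB.filter (fun w => PySem.Chars.startswith (cs.drop start.toNat) w.toList)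
      match PySem.List.max? ms (fun w => w) with
      | some best => best :: pvGoB cs fuel (start + (best.toList.length : Int))
      | none => pvGoB cs fuel (start + 1)

def WordsDict_alt (strs : String) : String :=
  PySem.Str.join " " (pvGoB strs.toList (strs.toList.length + 1) 0)

-- ===== PRECONDITION & SPEC =====
def Spec_WordsDict (strs : String) (out : String) : Prop := out = WordsDict_alt strs
instance (strs : String) (out : String) : Decidable (Spec_WordsDict strs out) := by unfold Spec_WordsDict; infer_instance

-- ===== CLAIM (what is proved, stated in full; the proofs are below) =====
def Claim_equal_WordsDict : Prop := ∀ (strs : String), Dom_WordsDict strs → Spec_WordsDict strs (WordsDict strs)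

-- ===== LEMMAS AND PROOFS =====

-- generic "keep the lexicographically greatest matching candidate" fold, String component only
def pvMStep {α : Type} (p : α → Prop) [DecidablePred p] (f : α → String) : String → α → String :=
  fun v a => if p a ∧ v < f a then f a else v

-- generic pair-valued fold of the shape A's inner loop has
def pvStep {α : Type} (p : α → Prop) [DecidablePred p] (f : α → String) (g : α → Int) :
    (String × Int) → α → (String × Int) :=
  fun vr a => if p a ∧ vr.1 < f a then (f a, g a) else vr

theorem pvMStep_pos {α : Type} (p : α → Prop) [DecidablePred p] (f : α → String)
    (v : String) (a : α) (h : p a ∧ v < f a) : pvMStep p f v a = f a := if_pos h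
theorem pvMStep_neg {α : Type} (p : α → Prop) [DecidablePred p] (f : α → String)
    (v : String) (a : α) (h : ¬ (p a ∧ v < f a)) : pvMStep p f v a = v := if_neg h
theorem pvStep_pos {α : Type} (p : α → Prop) [DecidablePred p] (f : α → String) (g : α → Int)
    (vr : String × Int) (a : α) (h : p a ∧ vr.1 < f a) : pvStep p f g vr a = (f a, g a) := if_pos h
theorem pvStep_neg {α : Type} (p : α → Prop) [DecidablePred p] (f : α → String) (g : α → Int)
    (vr : String × Int) (a : α) (h : ¬ (p a ∧ vr.1 < f a)) : pvStep p f g vr a = vr := if_neg h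

theorem pvStep_fst {α : Type} (p : α → Prop) [DecidablePred p] (f : α → String) (g : α → Int) :
    ∀ (l : List α) (vr : String × Int),
      (l.foldl (pvStep p f g) vr).1 = l.foldl (pvMStep p f) vr.1 := by
  intro l
  induction l with
  | nil => intro vr; rfl
  | cons a t ih =>
    intro vr
    simp only [List.foldl_cons]
    by_cases h : p a ∧ vr.1 < f a
    · rw [pvStep_pos p f g vr a h, pvMStep_pos p f vr.1 a h, ih]
    · rw [pvStep_neg p f g vr a h, pvMStep_neg p f vr.1 a h, ih]

theorem pvStep_snd {α : Type} (p : α → Prop) [DecidablePred p] (f : α → String) (g : α → Int)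
    (start : Int) :
    ∀ (l : List α) (vr : String × Int),
      (∀ a ∈ l, p a → g a = start + ((f a).toList.length : Int)) →
      vr.2 = start + (vr.1.toList.length : Int) →
      (l.foldl (pvStep p f g) vr).2 = start + (((l.foldl (pvStep p f g) vr).1).toList.length : Int) := by
  intro l
  induction l with
  | nil => intro vr _ hvr; simpa using hvr
  | cons a t ih =>
    intro vr hg hvr
    simp only [List.foldl_cons]
    by_cases h : p a ∧ vr.1 < f a
    · rw [pvStep_pos p f g vr a h]
      exact ih _ (fun b hb => hg b (List.mem_cons_of_mem a hb)) (hg a (List.mem_cons_self) h.1)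
    · rw [pvStep_neg p f g vr a h]
      exact ih _ (fun b hb => hg b (List.mem_cons_of_mem a hb)) hvr

theorem le_pvM {α : Type} (p : α → Prop) [DecidablePred p] (f : α → String) :
    ∀ (l : List α) (v : String), v ≤ l.foldl (pvMStep p f) v := by
  intro l
  induction l with
  | nil => intro v; exact le_refl v
  | cons a t ih =>
    intro v
    simp only [List.foldl_cons]
    by_cases h : p a ∧ v < f a
    · rw [pvMStep_pos p f v a h]
      exact le_trans (le_of_lt h.2) (ih (f a))
    · rw [pvMStep_neg p f v a h]
      exact ih v

theorem pvM_le {α : Type} (p : α → Prop) [DecidablePred p] (f : α → String) :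
    ∀ (l : List α) (v : String) (a : α), a ∈ l → p a → f a ≤ l.foldl (pvMStep p f) v := by
  intro l
  induction l with
  | nil => intro v a ha; exact absurd ha (List.not_mem_nil)
  | cons b t ih =>
    intro v a ha hpa
    simp only [List.foldl_cons]
    rcases List.mem_cons.mp ha with rfl | ht
    · by_cases h : p a ∧ v < f a
      · rw [pvMStep_pos p f v a h]
        exact le_pvM p f t (f a)
      · have hle : f a ≤ v := by
          by_contra hlt
          exact h ⟨hpa, lt_of_not_ge hlt⟩
        rw [pvMStep_neg p f v a h]
        exact le_trans hle (le_pvM p f t v)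
    · by_cases h : p b ∧ v < f b
      · rw [pvMStep_pos p f v b h]
        exact ih (f b) a ht hpa
      · rw [pvMStep_neg p f v b h]
        exact ih v a ht hpa

theorem pvM_cases {α : Type} (p : α → Prop) [DecidablePred p] (f : α → String) :
    ∀ (l : List α) (v : String),
      l.foldl (pvMStep p f) v = v ∨ ∃ a ∈ l, p a ∧ l.foldl (pvMStep p f) v = f a := by
  intro l
  induction l with
  | nil => intro v; exact Or.inl rfl
  | cons a t ih =>
    intro v
    simp only [List.foldl_cons]
    by_cases h : p a ∧ v < f a
    · rw [pvMStep_pos p f v a h]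
      rcases ih (f a) with h1 | ⟨b, hb, hpb, hb2⟩
      · exact Or.inr ⟨a, List.mem_cons_self, h.1, h1⟩
      · exact Or.inr ⟨b, List.mem_cons_of_mem a hb, hpb, hb2⟩
    · rw [pvMStep_neg p f v a h]
      rcases ih v with h1 | ⟨b, hb, hpb, hb2⟩
      · exact Or.inl h1
      · exact Or.inr ⟨b, List.mem_cons_of_mem a hb, hpb, hb2⟩

-- two "greatest matching candidate" folds with the same match set agree
theorem pvM_congr {α β : Type} (p1 : α → Prop) [DecidablePred p1] (f1 : α → String)
    (p2 : β → Prop) [DecidablePred p2] (f2 : β → String) (l1 : List α) (l2 : List β) (v : String)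
    (hset : ∀ s : String, (∃ a ∈ l1, p1 a ∧ f1 a = s) ↔ (∃ b ∈ l2, p2 b ∧ f2 b = s)) :
    l1.foldl (pvMStep p1 f1) v = l2.foldl (pvMStep p2 f2) v := by
  apply le_antisymm
  · rcases pvM_cases p1 f1 l1 v with h1 | ⟨a, ha, hpa, ha2⟩
    · rw [h1]; exact le_pvM p2 f2 l2 v
    · rw [ha2]
      rcases (hset (f1 a)).mp ⟨a, ha, hpa, rfl⟩ with ⟨b, hb, hpb, hb2⟩
      rw [← hb2]; exact pvM_le p2 f2 l2 v b hb hpb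
  · rcases pvM_cases p2 f2 l2 v with h1 | ⟨b, hb, hpb, hb2⟩
    · rw [h1]; exact le_pvM p1 f1 l1 v
    · rw [hb2]
      rcases (hset (f2 b)).mpr ⟨b, hb, hpb, rfl⟩ with ⟨a, ha, hpa, ha2⟩
      rw [← ha2]; exact pvM_le p1 f1 l1 v a ha hpa

-- a nested foldl is the foldl over the flattened pair list
theorem pv_foldl_nested {α γ σ : Type} (F : σ → γ × α → σ) :
    ∀ (es : List γ) (ws : List α) (init : σ),
      es.foldl (fun s e => ws.foldl (fun s w => F s (e, w)) s) init
        = (es.flatMap (fun e => ws.map (fun w => (e, w)))).foldl F init := by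
  intro es
  induction es with
  | nil => intro ws init; rfl
  | cons e t ih =>
    intro ws init
    simp only [List.foldl_cons, List.flatMap_cons, List.foldl_append, List.foldl_map, ih]

-- the match predicates of A's inner loops and of B's filter
abbrev pvPA (cs : List Char) (start : Int) (ew : Int × String) : Prop :=
  PySem.List.slice cs (some start) (some ew.1) = ew.2.toList
abbrev pvPB (cs : List Char) (start : Int) (w : String) : Prop :=
  PySem.Chars.startswith (cs.drop start.toNat) w.toList = true

-- the key per-word fact: a slice-match at some end in range(start+1, lens+1) is exactly a
-- startswith-match, and then the matching end is start + len(word)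
theorem pv_match_iff (cs : List Char) (start : Int) (w : String)
    (hs : 0 ≤ start) (hw : w.toList ≠ []) :
    (∃ e, (start + 1 ≤ e ∧ e < (cs.length : Int) + 1) ∧
          PySem.List.slice cs (some start) (some e) = w.toList)
      ↔ pvPB cs start w := by
  constructor
  · rintro ⟨e, ⟨he1, he2⟩, hsl⟩
    have he0 : 0 ≤ e := by omega
    rw [PySem.List.slice_toNat cs hs he0] at hsl
    have hk : e.toNat - start.toNat ≤ (cs.drop start.toNat).length := by
      simp only [List.length_drop]; omega
    have hlen : w.toList.length = e.toNat - start.toNat := by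
      rw [← hsl, List.length_take]; omega
    unfold pvPB
    rw [PySem.Chars.startswith_iff]
    rw [← hsl]
    exact List.take_prefix _ _
  · intro hp
    unfold pvPB at hp
    rw [PySem.Chars.startswith_iff] at hp
    have hlen : w.toList.length ≤ (cs.drop start.toNat).length := hp.length_le
    simp only [List.length_drop] at hlen
    have hwl : 1 ≤ w.toList.length := List.length_pos_iff.mpr hw
    refine ⟨start + (w.toList.length : Int), ⟨by omega, by omega⟩, ?_⟩
    rw [PySem.List.slice_toNat cs hs (by omega)]
    have : (start + (w.toList.length : Int)).toNat - start.toNat = w.toList.length := by omega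
    rw [this, ← List.prefix_iff_eq_take.mp hp]

-- when a pair matches, its end is start + len(word)
theorem pv_match_end (cs : List Char) (start : Int) (w : String) (e : Int)
    (hs : 0 ≤ start) (he1 : start + 1 ≤ e) (he2 : e < (cs.length : Int) + 1)
    (hsl : PySem.List.slice cs (some start) (some e) = w.toList) :
    e = start + (w.toList.length : Int) := by
  have he0 : 0 ≤ e := by omega
  rw [PySem.List.slice_toNat cs hs he0] at hsl
  have hlen : w.toList.length = e.toNat - start.toNat := by
    rw [← hsl, List.length_take, List.length_drop]; omega
  omega

-- the flattened pair list A's double loop walks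
def pvPairs (lens start : Int) : List (Int × String) :=
  (PySem.List.pyRange (start + 1) (lens + 1) 1).flatMap
    (fun e => (pvDict.map (·.2)).map (fun w => (e, w)))

theorem pvInnerA_eq_pairs (cs : List Char) (lens start : Int) :
    pvInnerA cs lens start
      = (pvPairs lens start).foldl (pvStep (pvPA cs start) (·.2) (·.1)) ("", start) := by
  unfold pvInnerA pvPairs
  rw [← pv_foldl_nested]
  apply PySem.List.foldl_congr_mem
  intro vr e he
  apply PySem.List.foldl_congr_mem
  intro vr' w hw
  by_cases h : pvPA cs start (e, w) ∧ vr'.1 < w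
  · rw [pvStep_pos (pvPA cs start) _ _ vr' (e, w) h]; exact if_pos h
  · rw [pvStep_neg (pvPA cs start) _ _ vr' (e, w) h]; exact if_neg h

theorem pv_dict_values_eq : pvDict.map (·.2) = pvWordsB := by decide

theorem pv_words_nonempty : ∀ w ∈ pvWordsB, w.toList ≠ [] := by decide

theorem pv_words_ne : ∀ w ∈ pvWordsB, w ≠ "" := by decide

theorem pv_empty_lt (w : String) (h : w.toList ≠ []) : ("" : String) < w := by
  rw [String.lt_iff_toList_lt]
  cases hw : w.toList with
  | nil => exact absurd hw h
  | cons c t => simp [String.toList_empty]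

theorem pv_words_pos : ∀ w ∈ pvWordsB, ("" : String) < w :=
  fun w hw => pv_empty_lt w (pv_words_nonempty w hw)

-- the two match sets coincide
theorem pv_hset (cs : List Char) (start : Int) (hs : 0 ≤ start) :
    ∀ s : String,
      (∃ a ∈ pvPairs (cs.length : Int) start, pvPA cs start a ∧ a.2 = s)
        ↔ (∃ b ∈ pvWordsB, pvPB cs start b ∧ b = s) := by
  intro s
  constructor
  · rintro ⟨⟨e, w⟩, ha, hpa, rfl⟩
    simp only [pvPairs, List.mem_flatMap] at ha
    rcases ha with ⟨e', he', hmm⟩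
    rcases List.mem_map.mp hmm with ⟨w', hw', heq⟩
    cases heq
    rw [pv_dict_values_eq] at hw'
    have hmem := PySem.List.mem_pyRange_one.mp he'
    refine ⟨w, hw', ?_, rfl⟩
    exact (pv_match_iff cs start w hs (pv_words_nonempty w hw')).mp ⟨e, hmem, hpa⟩
  · rintro ⟨w, hw, hpb, rfl⟩
    rcases (pv_match_iff cs start w hs (pv_words_nonempty w hw)).mpr hpb with ⟨e, he, hsl⟩
    refine ⟨(e, w), ?_, hsl, rfl⟩
    simp only [pvPairs, List.mem_flatMap]
    rw [pv_dict_values_eq]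
    exact ⟨e, PySem.List.mem_pyRange_one.mpr he, List.mem_map_of_mem hw⟩

-- the max-fold equals max? of the filtered list (on the String value; "" if no match)
theorem pvM_eq_max? (p : String → Prop) [DecidablePred p] (l : List String)
    (hne : ∀ w ∈ l, ("" : String) < w) :
    l.foldl (pvMStep p (fun w => w)) ""
      = (PySem.List.max? (l.filter (fun w => decide (p w))) (fun w => w)).getD "" := by
  rcases hmx : PySem.List.max? (l.filter (fun w => decide (p w))) (fun w => w) with _ | b
  · -- no match: filter is empty, so the fold never fires
    have hfe : l.filter (fun w => decide (p w)) = [] :=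
      (PySem.List.max?_eq_none_iff _ _).mp hmx
    rcases pvM_cases p (fun w => w) l "" with h1 | ⟨a, ha, hpa, ha2⟩
    · simpa using h1
    · exfalso
      have : a ∈ l.filter (fun w => decide (p w)) :=
        List.mem_filter.mpr ⟨ha, decide_eq_true hpa⟩
      rw [hfe] at this
      exact absurd this (List.not_mem_nil)
  · have hbmem := PySem.List.max?_mem hmx
    have hbp : p b := of_decide_eq_true (List.mem_filter.mp hbmem).2
    have hbl : b ∈ l := (List.mem_filter.mp hbmem).1
    have hmax := PySem.List.max?_isMax hmx
    simp only [Option.getD_some]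
    apply le_antisymm
    · rcases pvM_cases p (fun w => w) l "" with h1 | ⟨a, ha, hpa, ha2⟩
      · rw [h1]; exact le_of_lt (hne b hbl)
      · rw [ha2]
        exact hmax a (List.mem_filter.mpr ⟨ha, decide_eq_true hpa⟩)
    · exact pvM_le p (fun w => w) l "" b hbl hbp

-- A's inner result when there is no match / when max? picks best
theorem pvInnerA_char (cs : List Char) (start : Int) (hs : 0 ≤ start) :
    pvInnerA cs (cs.length : Int) start
      = (let m := (PySem.List.max? (pvWordsB.filter
            (fun w => PySem.Chars.startswith (cs.drop start.toNat) w.toList)) (fun w => w)).getD ""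
         (m, start + (m.toList.length : Int))) := by
  rw [pvInnerA_eq_pairs]
  have hga : ∀ a ∈ pvPairs (cs.length : Int) start, pvPA cs start a →
      a.1 = start + ((a.2).toList.length : Int) := by
    rintro ⟨e, w⟩ ha hpa
    simp only [pvPairs, List.mem_flatMap] at ha
    rcases ha with ⟨e', he', hmm⟩
    rcases List.mem_map.mp hmm with ⟨w', hw', heq⟩
    cases heq
    have hmem := PySem.List.mem_pyRange_one.mp he'
    exact pv_match_end cs start w e hs hmem.1 hmem.2 hpa
  have hfst :
      ((pvPairs (cs.length : Int) start).foldl (pvStep (pvPA cs start) (·.2) (·.1)) ("", start)).1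
        = pvWordsB.foldl (pvMStep (pvPB cs start) (fun w => w)) "" := by
    rw [pvStep_fst]
    exact pvM_congr _ _ _ _ _ _ _ (pv_hset cs start hs)
  have hsnd := pvStep_snd (pvPA cs start) (·.2) (·.1) start
    (pvPairs (cs.length : Int) start) ("", start) hga (by simp)
  have hmx := pvM_eq_max? (pvPB cs start) pvWordsB pv_words_pos
  have hfilter : pvWordsB.filter (fun w => decide (pvPB cs start w))
      = pvWordsB.filter (fun w => PySem.Chars.startswith (cs.drop start.toNat) w.toList) := by
    apply List.filter_congr
    intro w _
    simp [pvPB]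
  rw [hfilter] at hmx
  apply Prod.ext
  · simp only []
    rw [hfst, hmx]
  · simp only []
    rw [hsnd, hfst, hmx]

-- the per-word accumulation A performs, as a function of the emitted word list
def pvJoinAcc : String → List String → String
  | w, [] => w
  | w, v :: t => pvJoinAcc (if w = "" then w ++ v else w ++ " " ++ v) t

-- tail of a " "-join: concatenation of " " ++ v
def pvJoinTail : List String → String
  | [] => ""
  | v :: t => " " ++ v ++ pvJoinTail t

theorem pv_sep_ne_empty (w v : String) : w ++ " " ++ v ≠ "" := by
  intro h
  have := congrArg String.toList h
  simp at this

theorem pvJoinAcc_ne (l : List String) :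
    ∀ (w : String), w ≠ "" → pvJoinAcc w l = w ++ pvJoinTail l := by
  induction l with
  | nil => intro w _; simp [pvJoinAcc, pvJoinTail]
  | cons v t ih =>
    intro w hw
    simp only [pvJoinAcc, pvJoinTail, if_neg hw]
    rw [ih _ (pv_sep_ne_empty w v)]
    simp [String.append_assoc]

theorem pvJoin_eq_tail (v : String) (t : List String) :
    PySem.Str.join " " (v :: t) = v ++ pvJoinTail t := by
  induction t generalizing v with
  | nil =>
    refine String.toList_inj.mp ?_
    simp [PySem.Str.join, PySem.Chars.join_singleton, pvJoinTail]
  | cons b t' ih =>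
    have h1 : PySem.Str.join " " (v :: b :: t') = v ++ " " ++ PySem.Str.join " " (b :: t') := by
      refine String.toList_inj.mp ?_
      simp [PySem.Str.join, PySem.Chars.join_cons_cons]
    rw [h1, ih b, pvJoinTail]
    simp [String.append_assoc]

theorem pvJoinAcc_empty (l : List String) (hl : ∀ v ∈ l, v ≠ "") :
    pvJoinAcc "" l = PySem.Str.join " " l := by
  cases l with
  | nil =>
    refine String.toList_inj.mp ?_
    simp [pvJoinAcc, PySem.Str.join, PySem.Chars.join_nil]
  | cons v t =>
    have hv : v ≠ "" := hl v (List.mem_cons_self)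
    have h0 : pvJoinAcc "" (v :: t) = pvJoinAcc v t := by
      simp [pvJoinAcc]
    rw [h0, pvJoinAcc_ne t v hv, pvJoin_eq_tail]

-- every word B emits is one of the six dictionary words
theorem pvGoB_mem (cs : List Char) :
    ∀ (fuel : Nat) (start : Int), ∀ v ∈ pvGoB cs fuel start, v ∈ pvWordsB := by
  intro fuel
  induction fuel with
  | zero => intro start v hv; exact absurd hv (List.not_mem_nil)
  | succ n ih =>
    intro start v hv
    unfold pvGoB at hv
    by_cases hge : start ≥ (cs.length : Int)
    · rw [if_pos hge] at hv; exact absurd hv (List.not_mem_nil)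
    · rw [if_neg hge] at hv
      simp only [] at hv
      rcases hmx : PySem.List.max? (pvWordsB.filter
          (fun w => PySem.Chars.startswith (cs.drop start.toNat) w.toList)) (fun w => w) with _ | b
      · rw [hmx] at hv
        exact ih _ v hv
      · rw [hmx] at hv
        rcases List.mem_cons.mp hv with rfl | hvt
        · exact (List.mem_filter.mp (PySem.List.max?_mem hmx)).1
        · exact ih _ v hvt

-- A's loop equals the accumulated join of B's recursion
theorem pvLoop_eq_go (cs : List Char) :
    ∀ (fuel : Nat) (start : Int) (words : String), 0 ≤ start →
      pvLoopA cs (cs.length : Int) fuel start words = pvJoinAcc words (pvGoB cs fuel start) := by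
  intro fuel
  induction fuel with
  | zero => intro start words _; rfl
  | succ n ih =>
    intro start words hs
    unfold pvLoopA pvGoB
    by_cases hlt : start < (cs.length : Int)
    · rw [if_pos hlt, if_neg (show ¬ start ≥ (cs.length : Int) by omega)]
      rw [pvInnerA_char cs start hs]
      rcases hmx : PySem.List.max? (pvWordsB.filter
          (fun w => PySem.Chars.startswith (cs.drop start.toNat) w.toList)) (fun w => w) with _ | b
      · -- no match: val = "", rec = start, advance by 1
        simp only [hmx, Option.getD_none]
        simp only [String.toList_empty, List.length_nil, Nat.cast_zero, add_zero, ne_eq,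
          not_true_eq_false, if_false]
        rw [ih (start + 1) words (by omega)]
      · -- match: val = b, rec = start + len b ≠ start, advance to start + len b
        have hbmem := (List.mem_filter.mp (PySem.List.max?_mem hmx)).1
        have hblen : 1 ≤ b.toList.length := List.length_pos_iff.mpr (pv_words_nonempty b hbmem)
        have hbne : b ≠ "" := pv_words_ne b hbmem
        simp only [hmx, Option.getD_some]
        have hrec : start + (b.toList.length : Int) ≠ start := by omega
        rw [if_pos hrec, if_pos hbne]
        have hstep : start + (b.toList.length : Int) - 1 + 1 = start + (b.toList.length : Int) := by omega
        rw [hstep, ih (start + (b.toList.length : Int)) _ (by omega)]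
        rfl
    · rw [if_neg hlt, if_pos (show start ≥ (cs.length : Int) by omega)]
      rfl

-- ===== VERDICT (by name: the statement is the Claim_ definition above) =====
theorem WordsDict_spec : Claim_equal_WordsDict := by
  intro strs _
  unfold Spec_WordsDict WordsDict WordsDict_alt
  rw [pvLoop_eq_go strs.toList (strs.toList.length + 1) 0 "" (le_refl 0)]
  exact pvJoinAcc_empty _ (fun v hv => pv_words_ne v (pvGoB_mem strs.toList _ 0 v hv))
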